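-- pv_equiv track=rewrite | github.com/daniel-reich/turbo-robot | XALogvSrMr3LRwXPH_8.py | is_shuffled_well
-- ===== SOURCE A (Python) =====
-- def is_shuffled_well(lst):
--     count_up, count_down = 0, 0
--     for i in range(1, len(lst)):
--         if lst[i] == lst[i - 1] + 1:
--             count_up += 1
--             count_down = 0
--         elif lst[i] == lst[i - 1] - 1:
--             count_down += 1
--             count_up = 0
--         else:
--             count_up, count_down = 0, 0
--         if count_up == 2 or count_down == 2:
--             return False
--     return True
-- ===== SOURCE B (Python) =====
-- def is_shuffled_well(lst):
--     for a, b, c in zip(lst, lst[1:], lst[2:]):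
--         if (b == a + 1 and c == b + 1) or (b == a - 1 and c == b - 1):
--             return False
--     return True
-- ===== Notes on version B (the rewrite author's own statement) =====
-- stated objective: simpler
-- what changed: Replaces the stateful scan with two run-length counters by a stateless sliding-triple check that rejects as soon as three consecutive elements form a strictly ascending or descending +1/-1 run.
import Mathlib
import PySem

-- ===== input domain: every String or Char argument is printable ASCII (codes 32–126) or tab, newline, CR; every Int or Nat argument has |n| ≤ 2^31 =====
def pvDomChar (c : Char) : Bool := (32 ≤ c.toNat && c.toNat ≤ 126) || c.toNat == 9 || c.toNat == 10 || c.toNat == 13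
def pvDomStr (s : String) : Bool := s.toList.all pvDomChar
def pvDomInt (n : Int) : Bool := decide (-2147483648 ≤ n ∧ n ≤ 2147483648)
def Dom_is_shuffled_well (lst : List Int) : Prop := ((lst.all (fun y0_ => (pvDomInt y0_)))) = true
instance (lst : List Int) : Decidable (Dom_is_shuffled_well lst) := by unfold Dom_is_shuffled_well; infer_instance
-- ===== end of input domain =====

-- B replaces A's two running counters by a stateless check of each sliding triple (simpler).

-- ===== PORT A =====
-- the loop over range(1, len(lst)) with early return, as structural recursion over the
-- index list; lst[i] / lst[i-1] via pyGetD (indices are always in range here, so exact)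
def iswGoA (lst : List Int) : List Int → Int → Int → Bool
  | [], _, _ => true
  | i :: rest, count_up, count_down =>
    let s : Int × Int :=
      if PySem.List.pyGetD lst i 0 = PySem.List.pyGetD lst (i - 1) 0 + 1 then
        (count_up + 1, 0)
      else if PySem.List.pyGetD lst i 0 = PySem.List.pyGetD lst (i - 1) 0 - 1 then
        (0, count_down + 1)
      else (0, 0)
    if s.1 = 2 ∨ s.2 = 2 then false else iswGoA lst rest s.1 s.2

def is_shuffled_well (lst : List Int) : Bool :=
  iswGoA lst (PySem.List.pyRange 1 lst.length 1) 0 0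

-- ===== PORT B =====
-- zip(lst, lst[1:], lst[2:]) iterates the sliding triples; early return = recursion stop
def iswGoB : List Int → Bool
  | a :: b :: c :: rest =>
    if (b = a + 1 ∧ c = b + 1) ∨ (b = a - 1 ∧ c = b - 1) then false
    else iswGoB (b :: c :: rest)
  | _ => true

def is_shuffled_well_alt (lst : List Int) : Bool := iswGoB lst

-- ===== PRECONDITION & SPEC =====
def Spec_is_shuffled_well (lst : List Int) (out : Bool) : Prop := out = is_shuffled_well_alt lst
instance (lst : List Int) (out : Bool) : Decidable (Spec_is_shuffled_well lst out) := by unfold Spec_is_shuffled_well; infer_instance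

-- ===== CLAIM (what is proved, stated in full; the proofs are below) =====
def Claim_equal_is_shuffled_well : Prop := ∀ (lst : List Int), Dom_is_shuffled_well lst → Spec_is_shuffled_well lst (is_shuffled_well lst)

-- ===== LEMMAS AND PROOFS =====

-- A's loop, reformulated on the list itself: prev is the previous element, l the rest
def iswLoopL (prev count_up count_down : Int) : List Int → Bool
  | [] => true
  | x :: rest =>
    let s : Int × Int :=
      if x = prev + 1 then (count_up + 1, 0)
      else if x = prev - 1 then (0, count_down + 1)
      else (0, 0)
    if s.1 = 2 ∨ s.2 = 2 then false else iswLoopL x s.1 s.2 rest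

theorem iswGoA_eq_loopL_aux (lst : List Int) (n : Nat) :
    ∀ (i : Nat) (cu cd : Int), 1 ≤ i → lst.length - i = n →
      iswGoA lst (PySem.List.pyRange i lst.length 1) cu cd
        = iswLoopL (lst.getD (i - 1) 0) cu cd (lst.drop i) := by
  induction n with
  | zero =>
    intro i cu cd hi hn
    have hle : (lst.length : Int) ≤ (i : Int) := by exact_mod_cast (by omega : lst.length ≤ i)
    rw [PySem.List.pyRange_one_eq_nil hle, List.drop_eq_nil_of_le (by omega)]
    rfl
  | succ n ih =>
    intro i cu cd hi hn
    have hlt : i < lst.length := by omega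
    have hltI : (i : Int) < (lst.length : Int) := by exact_mod_cast hlt
    rw [PySem.List.pyRange_one_cons hltI, List.drop_eq_getElem_cons hlt]
    have h1 : PySem.List.pyGetD lst (i : Int) 0 = lst[i] := by
      rw [PySem.List.pyGetD_natCast]
      exact List.getD_eq_getElem lst 0 hlt
    have h2 : PySem.List.pyGetD lst ((i : Int) - 1) 0 = lst.getD (i - 1) 0 := by
      rw [show ((i : Int) - 1) = ((i - 1 : Nat) : Int) by omega, PySem.List.pyGetD_natCast]
    have h3 : ((i : Int) + 1) = ((i + 1 : Nat) : Int) := by push_cast; ring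
    have h4 : lst.getD ((i + 1) - 1) 0 = lst[i] := by
      simpa using List.getD_eq_getElem lst 0 hlt
    simp only [iswGoA, iswLoopL, h1, h2, h3]
    split_ifs <;>
      first
      | rfl
      | (rw [show lst[i] = lst.getD ((i + 1) - 1) 0 from h4.symm]
         exact ih (i + 1) _ _ (by omega) (by omega))

theorem iswGoA_eq_loopL (lst : List Int) (i : Nat) (cu cd : Int) (hi : 1 ≤ i) :
    iswGoA lst (PySem.List.pyRange i lst.length 1) cu cd
      = iswLoopL (lst.getD (i - 1) 0) cu cd (lst.drop i) :=
  iswGoA_eq_loopL_aux lst (lst.length - i) i cu cd hi rfl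

theorem iswGoB_skip (x y : Int) (l : List Int) (h1 : y ≠ x + 1) (h2 : y ≠ x - 1) :
    iswGoB (x :: y :: l) = iswGoB (y :: l) := by
  cases l with
  | nil => rfl
  | cons c rest => simp [iswGoB, h1, h2]

theorem isw_main (l : List Int) :
    (∀ x, iswLoopL x 0 0 l = iswGoB (x :: l)) ∧
    (∀ p x, x = p + 1 → iswLoopL x 1 0 l = iswGoB (p :: x :: l)) ∧
    (∀ p x, x = p - 1 → iswLoopL x 0 1 l = iswGoB (p :: x :: l)) := by
  induction l with
  | nil =>
    refine ⟨fun x => rfl, fun p x _ => rfl, fun p x _ => rfl⟩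
  | cons y l ih =>
    obtain ⟨ih0, ihu, ihd⟩ := ih
    refine ⟨?_, ?_, ?_⟩
    · intro x
      by_cases hu : y = x + 1
      · simpa [iswLoopL, hu] using ihu x y hu
      · by_cases hd : y = x - 1
        · have h1 : (x - 1 ≠ x + 1) := by omega
          simpa [iswLoopL, hd, h1] using ihd x y hd
        · rw [iswGoB_skip x y l hu hd]
          simpa [iswLoopL, hu, hd] using ih0 y
    · intro p x hx
      by_cases hu : y = x + 1
      · simp [iswLoopL, iswGoB, hu, hx]
      · by_cases hd : y = x - 1
        · have h1 : (x - 1 ≠ x + 1) := by omega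
          rw [show iswGoB (p :: x :: y :: l) = iswGoB (x :: y :: l) by
            simp [iswGoB, hx]; omega]
          simpa [iswLoopL, hd, h1] using ihd x y hd
        · rw [show iswGoB (p :: x :: y :: l) = iswGoB (x :: y :: l) by
            simp [iswGoB, hx]; omega]
          rw [iswGoB_skip x y l hu hd]
          simpa [iswLoopL, hu, hd] using ih0 y
    · intro p x hx
      by_cases hd : y = x - 1
      · have h1 : (p - 1 - 1 ≠ p) := by omega
        simp [iswLoopL, iswGoB, hd, hx, h1]
      · by_cases hu : y = x + 1
        · have : ¬ (x = p + 1) := by omega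
          rw [show iswGoB (p :: x :: y :: l) = iswGoB (x :: y :: l) by
            simp [iswGoB, hx, hu]; omega]
          simpa [iswLoopL, hu] using ihu x y hu
        · rw [show iswGoB (p :: x :: y :: l) = iswGoB (x :: y :: l) by
            simp [iswGoB, hx]; omega]
          rw [iswGoB_skip x y l hu hd]
          simpa [iswLoopL, hu, hd] using ih0 y

-- ===== VERDICT (by name: the statement is the Claim_ definition above) =====
theorem is_shuffled_well_spec : Claim_equal_is_shuffled_well := by
  intro lst _
  unfold Spec_is_shuffled_well is_shuffled_well is_shuffled_well_alt
  cases lst with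
  | nil => rfl
  | cons x t =>
    rw [show (iswGoA (x :: t) (PySem.List.pyRange 1 (x :: t).length 1) 0 0)
          = iswLoopL ((x :: t).getD (1 - 1) 0) 0 0 ((x :: t).drop 1) from
        iswGoA_eq_loopL (x :: t) 1 0 0 le_rfl]
    simpa using (isw_main t).1 x
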